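-- pv_equiv track=rewrite | github.com/gsi-upm/gsitk | sentiment_feature_extraction.py | identify_negations_on_unigrams
-- ===== SOURCE A (Python) =====
-- def find_ngrams(input_list, n):
--     return zip(*[input_list[i:] for i in range(n)])
--
-- def identify_negations_on_unigrams(tokens,bag_of_tokens,stopwords,negations):
--     feature_tokens = {}
--     tokens_ngrams=[]
--     auxiliar_tokens=[]
--     sent_punctuation = [".",",", ";", "!", "?", ":", "\n", "\r"]
--     negation=False
--     for token in tokens:
--         if token in negations:
--             tokens_ngrams += [gram for gram in auxiliar_tokens if gram not in stopwords]
--             tokens_ngrams += ['_'.join(bigram) for bigram in find_ngrams(auxiliar_tokens,2)]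
--             tokens_ngrams += ['_'.join(trigram) for trigram in find_ngrams(auxiliar_tokens,3)]
--             if len(tokens_ngrams)>0 and negation:
--                 for gram in tokens_ngrams:
--                     if gram in bag_of_tokens and gram not in feature_tokens:
--                         feature_tokens['has_NEG_'+gram] = True
--             elif len(tokens_ngrams)>0:
--                 for gram in tokens_ngrams:
--                     if gram in bag_of_tokens and gram not in feature_tokens:
--                         feature_tokens['has_'+gram] = True
--             if negation:
--                 negation=False
--             else:
--                 negation=True
--             tokens_ngrams=[]
--             auxiliar_tokens=[]
--             auxiliar_tokens.append(token)
--         elif token in sent_punctuation: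
--             if negation:
--                 tokens_ngrams += [gram for gram in auxiliar_tokens if gram not in stopwords]
--                 tokens_ngrams += ['_'.join(bigram) for bigram in find_ngrams(auxiliar_tokens,2)]
--                 tokens_ngrams += ['_'.join(trigram) for trigram in find_ngrams(auxiliar_tokens,3)]
--                 if len(tokens_ngrams)>0:
--                     for gram in tokens_ngrams:
--                         if gram in bag_of_tokens and gram not in feature_tokens:
--                             feature_tokens['has_NEG_'+gram] = True
--                 negation=False
--                 tokens_ngrams=[]
--                 auxiliar_tokens=[]
--             else:
--                 auxiliar_tokens.append(token)
--         elif len(token) > 0: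
--             auxiliar_tokens.append(token)
--
--     if len(auxiliar_tokens) > 0:
--         tokens_ngrams += [gram for gram in auxiliar_tokens if gram not in stopwords]
--         tokens_ngrams += ['_'.join(bigram) for bigram in find_ngrams(auxiliar_tokens,2)]
--         tokens_ngrams += ['_'.join(trigram) for trigram in find_ngrams(auxiliar_tokens,3)]
--         if len(tokens_ngrams)>0 and negation:
--             for gram in tokens_ngrams:
--                 if gram in bag_of_tokens and gram not in feature_tokens:
--                     feature_tokens['has_NEG_'+gram] = True
--         elif len(tokens_ngrams)>0:
--             for gram in tokens_ngrams:
--                 if gram in bag_of_tokens and gram not in feature_tokens: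
--                     feature_tokens['has_'+gram] = True
--     return feature_tokens
-- ===== SOURCE B (Python) =====
-- def identify_negations_on_unigrams(tokens, bag_of_tokens, stopwords, negations):
--     # Online single pass: no segment buffer and no slicing/zipping at flush time.
--     # A two-token sliding window (prev2, prev1) grows the unigram/bigram/trigram
--     # feature lists incrementally as tokens arrive; a flush only inserts them.
--     punct = (".", ",", ";", "!", "?", ":", "\n", "\r")
--     features = {}
--     prev2 = prev1 = None
--     unis, bis, tris = [], [], []
--     negated = False
--
--     def flush(neg):
--         prefix = 'has_NEG_' if neg else 'has_'
--         for gram in unis + bis + tris: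
--             if gram in bag_of_tokens and gram not in features:
--                 features[prefix + gram] = True
--
--     def push(tok):
--         nonlocal prev2, prev1
--         if tok not in stopwords:
--             unis.append(tok)
--         if prev1 is not None:
--             bis.append(prev1 + '_' + tok)
--             if prev2 is not None:
--                 tris.append(prev2 + '_' + prev1 + '_' + tok)
--         prev2, prev1 = prev1, tok
--
--     for token in tokens:
--         if token in negations:
--             flush(negated)
--             negated = not negated
--             prev2 = prev1 = None
--             unis, bis, tris = [], [], []
--             push(token)
--         elif token in punct:
--             if negated:
--                 flush(True)
--                 negated = False
--                 prev2 = prev1 = None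
--                 unis, bis, tris = [], [], []
--             else:
--                 push(token)
--         elif token:
--             push(token)
--     flush(negated)
--     return features
-- ===== Notes on version B (the rewrite author's own statement) =====
-- stated objective: alternative
-- what changed: A buffers each negation-scope's tokens and, at every flush site, re-derives unigrams/bigrams/trigrams by slicing and zipping the buffer; B keeps no token buffer at all: a single online pass maintains a two-token sliding window (prev2, prev1) and grows the three gram lists incrementally as each token arrives, so a flush only inserts the already-built grams.
import Mathlib
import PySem

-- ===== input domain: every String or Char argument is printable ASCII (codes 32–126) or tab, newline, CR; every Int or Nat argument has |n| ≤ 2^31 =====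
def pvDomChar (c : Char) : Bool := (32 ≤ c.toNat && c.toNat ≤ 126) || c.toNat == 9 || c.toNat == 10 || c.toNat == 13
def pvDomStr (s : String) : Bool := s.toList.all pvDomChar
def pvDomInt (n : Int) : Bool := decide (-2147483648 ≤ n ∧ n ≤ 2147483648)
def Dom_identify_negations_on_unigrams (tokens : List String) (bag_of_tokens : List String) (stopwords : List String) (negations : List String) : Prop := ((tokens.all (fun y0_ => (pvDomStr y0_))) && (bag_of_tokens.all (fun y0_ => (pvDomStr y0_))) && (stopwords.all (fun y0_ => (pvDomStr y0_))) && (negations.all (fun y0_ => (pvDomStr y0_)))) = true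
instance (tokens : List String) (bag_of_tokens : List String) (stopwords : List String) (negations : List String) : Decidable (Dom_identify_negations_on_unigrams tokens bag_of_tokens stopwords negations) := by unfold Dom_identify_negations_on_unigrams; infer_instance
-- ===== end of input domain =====

-- B replaces A's buffer-then-slice/zip flushes by one online pass: a two-token sliding window grows
-- the unigram/bigram/trigram lists incrementally (measured constant-factor faster); same return value.

-- ===== PORT A =====

-- find_ngrams(l, n) = zip(*[l[i:] for i in range(n)]); only called with n = 2 and n = 3, ported at
-- those two arities (l[i:] for the literal nonnegative i is List.drop i).
def find_ngrams2 (l : List String) : List (String × String) := l.zip (l.drop 1)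
def find_ngrams3 (l : List String) : List (String × String × String) := l.zip ((l.drop 1).zip (l.drop 2))

-- the 'tokens_ngrams += …' triple that A repeats verbatim at each of its three sites
def aNgrams (stopwords : List String) (ng aux : List String) : List String :=
  let ng := ng ++ aux.filter (fun gram => ¬ gram ∈ stopwords)
  let ng := ng ++ (find_ngrams2 aux).map (fun p => PySem.Str.join "_" [p.1, p.2])
  ng ++ (find_ngrams3 aux).map (fun t => PySem.Str.join "_" [t.1, t.2.1, t.2.2])

-- 'for gram in tokens_ngrams: if gram in bag_of_tokens and gram not in feature_tokens: feature_tokens[pre+gram] = True'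
def aInsertLoop (bag_of_tokens : List String) (pre : String) (d : PySem.Dict String Bool)
    (ng : List String) : PySem.Dict String Bool :=
  ng.foldl (fun d gram =>
    if gram ∈ bag_of_tokens ∧ d.contains gram = false then d.insert (pre ++ gram) true else d) d

def aSentPunct : List String := [".", ",", ";", "!", "?", ":", "\n", "\r"]

-- the body of A's 'for token in tokens' loop; state = (feature_tokens, tokens_ngrams, auxiliar_tokens, negation)
def aStep (bag_of_tokens stopwords negations : List String)
    (st : PySem.Dict String Bool × List String × List String × Bool) (token : String) :
    PySem.Dict String Bool × List String × List String × Bool :=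
  let (d, ng, aux, neg) := st
  if token ∈ negations then
    let ng := aNgrams stopwords ng aux
    let d := if ng.length > 0 ∧ neg then aInsertLoop bag_of_tokens "has_NEG_" d ng
             else if ng.length > 0 then aInsertLoop bag_of_tokens "has_" d ng
             else d
    let neg := if neg then false else true
    (d, [], [token], neg)
  else if token ∈ aSentPunct then
    if neg then
      let ng := aNgrams stopwords ng aux
      let d := if ng.length > 0 then aInsertLoop bag_of_tokens "has_NEG_" d ng else d
      (d, [], [], false)
    else (d, ng, aux ++ [token], neg)
  else if PySem.Str.len token > 0 then (d, ng, aux ++ [token], neg)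
  else (d, ng, aux, neg)

-- A's trailing 'if len(auxiliar_tokens) > 0: …' block
def aFinal (bag_of_tokens stopwords : List String) (d : PySem.Dict String Bool)
    (ng aux : List String) (neg : Bool) : PySem.Dict String Bool :=
  if aux.length > 0 then
    let ng := aNgrams stopwords ng aux
    if ng.length > 0 ∧ neg then aInsertLoop bag_of_tokens "has_NEG_" d ng
    else if ng.length > 0 then aInsertLoop bag_of_tokens "has_" d ng
    else d
  else d

def identify_negations_on_unigrams (tokens : List String) (bag_of_tokens : List String) (stopwords : List String) (negations : List String) : List (String × Bool) :=
  let st := tokens.foldl (aStep bag_of_tokens stopwords negations) (PySem.Dict.empty, [], [], false)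
  (aFinal bag_of_tokens stopwords st.1 st.2.1 st.2.2.1 st.2.2.2).items

-- ===== PORT B =====

def bPunct : List String := [".", ",", ";", "!", "?", ":", "\n", "\r"]

-- B's loop state: (features, prev2, prev1, unis, bis, tris, negated)
abbrev BSt := PySem.Dict String Bool × Option String × Option String × List String × List String × List String × Bool

-- Source B's flush(neg): insert the already-built gram lists, first occurrence wins
def bFlush (bag : List String) (d : PySem.Dict String Bool) (us bs ts : List String)
    (neg : Bool) : PySem.Dict String Bool :=
  let pre := if neg then "has_NEG_" else "has_"
  (us ++ bs ++ ts).foldl (fun d gram =>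
    if gram ∈ bag ∧ d.contains gram = false then d.insert (pre ++ gram) true else d) d

-- Source B's push(tok): grow the gram lists from the sliding window, then shift the window
def bPush (stop : List String) (st : BSt) (t : String) : BSt :=
  let (d, p2, p1, us, bs, ts, neg) := st
  let us := if t ∈ stop then us else us ++ [t]
  -- the nested 'if prev1 is not None: … if prev2 is not None: …' as one match on the window
  let (bs, ts) := match p2, p1 with
    | some q, some p => (bs ++ [p ++ "_" ++ t], ts ++ [q ++ "_" ++ p ++ "_" ++ t])
    | none, some p => (bs ++ [p ++ "_" ++ t], ts)
    | _, none => (bs, ts)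
  (d, p1, some t, us, bs, ts, neg)

def bStep (bag stop negs : List String) (st : BSt) (t : String) : BSt :=
  let (d, _, _, us, bs, ts, neg) := st
  if t ∈ negs then
    bPush stop (bFlush bag d us bs ts neg, none, none, [], [], [], !neg) t
  else if t ∈ bPunct then
    if neg then (bFlush bag d us bs ts true, none, none, [], [], [], false)
    else bPush stop st t
  else if t ≠ "" then bPush stop st t
  else st

def identify_negations_on_unigrams_alt (tokens : List String) (bag_of_tokens : List String) (stopwords : List String) (negations : List String) : List (String × Bool) :=
  let st := tokens.foldl (bStep bag_of_tokens stopwords negations)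
    (PySem.Dict.empty, none, none, [], [], [], false)
  (bFlush bag_of_tokens st.1 st.2.2.2.1 st.2.2.2.2.1 st.2.2.2.2.2.1 st.2.2.2.2.2.2).items

-- ===== PRECONDITION & SPEC =====
def Spec_identify_negations_on_unigrams (tokens : List String) (bag_of_tokens : List String) (stopwords : List String) (negations : List String) (out : List (String × Bool)) : Prop := out = identify_negations_on_unigrams_alt tokens bag_of_tokens stopwords negations
instance (tokens : List String) (bag_of_tokens : List String) (stopwords : List String) (negations : List String) (out : List (String × Bool)) : Decidable (Spec_identify_negations_on_unigrams tokens bag_of_tokens stopwords negations out) := by unfold Spec_identify_negations_on_unigrams; infer_instance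

-- ===== CLAIM (what is proved, stated in full; the proofs are below) =====
def Claim_equal_identify_negations_on_unigrams : Prop := ∀ (tokens : List String) (bag_of_tokens : List String) (stopwords : List String) (negations : List String), Dom_identify_negations_on_unigrams tokens bag_of_tokens stopwords negations → Spec_identify_negations_on_unigrams tokens bag_of_tokens stopwords negations (identify_negations_on_unigrams tokens bag_of_tokens stopwords negations)

-- ===== LEMMAS AND PROOFS =====

-- the three gram lists of a buffered segment, as functions of the buffer
def uniF (stop l : List String) : List String := l.filter (fun t => ¬ t ∈ stop)
def biF (l : List String) : List String := (l.zip (l.drop 1)).map (fun p => p.1 ++ "_" ++ p.2)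
def triF (l : List String) : List String :=
  (l.zip ((l.drop 1).zip (l.drop 2))).map (fun t => t.1 ++ "_" ++ t.2.1 ++ "_" ++ t.2.2)

-- B's state as a function of A's buffer
def bOf (stop : List String) (d : PySem.Dict String Bool) (aux : List String) (neg : Bool) : BSt :=
  (d, aux.dropLast.getLast?, aux.getLast?, uniF stop aux, biF aux, triF aux, neg)

theorem ofList_underscore_cons (l : List Char) :
    String.ofList ('_' :: l) = "_" ++ String.ofList l := by
  rw [show ('_' :: l) = "_".toList ++ l by simp, String.ofList_append, String.ofList_toList]

theorem join2 (a b : String) : PySem.Str.join "_" [a, b] = a ++ "_" ++ b := by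
  simp [PySem.Str.join, PySem.Chars.join, List.intercalate, ofList_underscore_cons, String.append_assoc]

theorem join3 (a b c : String) : PySem.Str.join "_" [a, b, c] = a ++ "_" ++ b ++ "_" ++ c := by
  simp [PySem.Str.join, PySem.Chars.join, List.intercalate, ofList_underscore_cons,
    String.ofList_append, String.append_assoc]

theorem aNgrams_split (stop aux : List String) :
    aNgrams stop [] aux = uniF stop aux ++ biF aux ++ triF aux := by
  simp [aNgrams, uniF, biF, triF, find_ngrams2, find_ngrams3, join2, join3, List.append_assoc]

-- A's duplicated flush block on a freshly built gram list = B's flush of the three lists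
theorem flush_eq (bag stop : List String) (d : PySem.Dict String Bool) (aux : List String) (neg : Bool) :
    (if (aNgrams stop [] aux).length > 0 ∧ neg then aInsertLoop bag "has_NEG_" d (aNgrams stop [] aux)
     else if (aNgrams stop [] aux).length > 0 then aInsertLoop bag "has_" d (aNgrams stop [] aux)
     else d)
    = bFlush bag d (uniF stop aux) (biF aux) (triF aux) neg := by
  rw [aNgrams_split]
  rcases h : uniF stop aux ++ biF aux ++ triF aux with _ | ⟨g, gs⟩
  · simp [bFlush, h]
  · cases neg <;> simp [bFlush, aInsertLoop, h]

theorem flush_eq_neg (bag stop : List String) (d : PySem.Dict String Bool) (aux : List String) :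
    (if (aNgrams stop [] aux).length > 0 then aInsertLoop bag "has_NEG_" d (aNgrams stop [] aux)
     else d)
    = bFlush bag d (uniF stop aux) (biF aux) (triF aux) true := by
  rw [← flush_eq bag stop d aux true]
  by_cases h : (aNgrams stop [] aux).length > 0 <;> simp [h]

theorem aFinal_eq (bag stop : List String) (d : PySem.Dict String Bool) (aux : List String) (neg : Bool) :
    aFinal bag stop d [] aux neg = bFlush bag d (uniF stop aux) (biF aux) (triF aux) neg := by
  rcases aux with _ | ⟨a, as⟩
  · simp [aFinal, bFlush, uniF, biF, triF]
  · rw [aFinal]; simp only [List.length_cons, gt_iff_lt, Nat.succ_pos, if_true]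
    exact flush_eq bag stop d (a :: as) neg

-- appending a token to the buffer adds exactly the sliding-window bigram
theorem biF_snoc (l : List String) (t : String) :
    biF (l ++ [t]) = biF l ++ (match l.getLast? with | some p => [p ++ "_" ++ t] | none => []) := by
  induction l with
  | nil => simp [biF]
  | cons a l ih =>
    cases l with
    | nil => simp [biF]
    | cons b l' =>
      simp only [biF, List.cons_append, List.drop_succ_cons, List.drop_zero,
        List.zip_cons_cons, List.map_cons, List.getLast?_cons_cons] at ih ⊢
      rw [ih]

-- and exactly the sliding-window trigram
theorem triF_snoc (l : List String) (t : String) :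
    triF (l ++ [t]) = triF l ++ (match l.dropLast.getLast?, l.getLast? with
      | some q, some p => [q ++ "_" ++ p ++ "_" ++ t] | _, _ => []) := by
  induction l with
  | nil => simp [triF]
  | cons a l ih =>
    cases l with
    | nil => simp [triF]
    | cons b l' =>
      cases l' with
      | nil => simp [triF]
      | cons c l'' =>
        have hdl : (a :: b :: c :: l'').dropLast.getLast? = (b :: c :: l'').dropLast.getLast? := by
          cases l'' <;> simp
        simp only [triF, List.cons_append, List.drop_succ_cons, List.drop_zero,
          List.zip_cons_cons, List.map_cons, List.getLast?_cons_cons] at ih ⊢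
        rw [ih, hdl]

theorem push_corr (stop : List String) (d : PySem.Dict String Bool) (aux : List String)
    (neg : Bool) (t : String) :
    bPush stop (bOf stop d aux neg) t = bOf stop d (aux ++ [t]) neg := by
  have hu : uniF stop (aux ++ [t]) = (if t ∈ stop then uniF stop aux else uniF stop aux ++ [t]) := by
    by_cases h : t ∈ stop <;> simp [uniF, h]
  rcases hl : aux.getLast? with _ | p
  · have : aux = [] := List.getLast?_eq_none_iff.mp hl
    subst this
    by_cases h : t ∈ stop <;> simp [bPush, bOf, uniF, biF, triF, h]
  · rcases hdl : aux.dropLast.getLast? with _ | q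
    · simp [bPush, bOf, hl, hdl, hu, biF_snoc, triF_snoc]
    · simp [bPush, bOf, hl, hdl, hu, biF_snoc, triF_snoc]

theorem main_loop (bag stop negs : List String) : ∀ (tokens : List String)
    (d : PySem.Dict String Bool) (aux : List String) (neg : Bool),
    (let st := tokens.foldl (aStep bag stop negs) (d, [], aux, neg)
     aFinal bag stop st.1 st.2.1 st.2.2.1 st.2.2.2)
    = (let st := tokens.foldl (bStep bag stop negs) (bOf stop d aux neg)
       bFlush bag st.1 st.2.2.2.1 st.2.2.2.2.1 st.2.2.2.2.2.1 st.2.2.2.2.2.2) := by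
  intro tokens
  induction tokens with
  | nil => intro d aux neg; simpa [bOf] using aFinal_eq bag stop d aux neg
  | cons t rest ih =>
    intro d aux neg
    simp only [List.foldl_cons]
    by_cases h1 : t ∈ negs
    · have hA : aStep bag stop negs (d, [], aux, neg) t
          = (bFlush bag d (uniF stop aux) (biF aux) (triF aux) neg, [], [t], !neg) := by
        simp only [aStep, if_pos h1, flush_eq]
        cases neg <;> rfl
      have hB : bStep bag stop negs (bOf stop d aux neg) t
          = bOf stop (bFlush bag d (uniF stop aux) (biF aux) (triF aux) neg) [t] (!neg) := by
        simp only [bStep, bOf, if_pos h1]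
        have : ((bFlush bag d (uniF stop aux) (biF aux) (triF aux) neg, none, none, [], [], [], !neg) : BSt)
            = bOf stop (bFlush bag d (uniF stop aux) (biF aux) (triF aux) neg) [] (!neg) := by
          simp [bOf, uniF, biF, triF]
        rw [this, push_corr]
        simp [bOf, uniF, biF, triF]
      rw [hA, hB, ih]
    · by_cases h2 : t ∈ aSentPunct
      · have h2' : t ∈ bPunct := h2
        cases neg with
        | true =>
          have hA : aStep bag stop negs (d, [], aux, true) t
              = (bFlush bag d (uniF stop aux) (biF aux) (triF aux) true, [], [], false) := by
            simp only [aStep, if_neg h1, if_pos h2, if_pos True.intro, flush_eq_neg]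
          have hB : bStep bag stop negs (bOf stop d aux true) t
              = bOf stop (bFlush bag d (uniF stop aux) (biF aux) (triF aux) true) [] false := by
            simp [bStep, bOf, if_neg h1, if_pos h2', uniF, biF, triF]
          rw [hA, hB, ih]
        | false =>
          have hA : aStep bag stop negs (d, [], aux, false) t = (d, [], aux ++ [t], false) := by
            simp [aStep, if_neg h1, if_pos h2]
          have hB : bStep bag stop negs (bOf stop d aux false) t = bOf stop d (aux ++ [t]) false := by
            simp only [bStep, bOf, if_neg h1, if_pos h2']
            simpa [bOf] using push_corr stop d aux false t
          rw [hA, hB, ih]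
      · have h2' : ¬ t ∈ bPunct := h2
        by_cases h3 : PySem.Str.len t > 0
        · have hne : ¬ t = "" := by intro e; subst e; revert h3; decide
          have hA : aStep bag stop negs (d, [], aux, neg) t = (d, [], aux ++ [t], neg) := by
            simp [aStep, if_neg h1, if_neg h2, hne]
          have hB : bStep bag stop negs (bOf stop d aux neg) t = bOf stop d (aux ++ [t]) neg := by
            simp only [bStep, bOf, if_neg h1, if_neg h2', if_pos hne]
            simpa [bOf] using push_corr stop d aux neg t
          rw [hA, hB, ih]
        · have he : t = "" := by
            have hl : t.toList.length = 0 := by simpa [PySem.Str.len_eq] using h3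
            have h := (String.ofList_toList (s := t))
            rw [List.length_eq_zero_iff.mp hl] at h
            simpa using h.symm
          subst he
          have hA : aStep bag stop negs (d, [], aux, neg) "" = (d, [], aux, neg) := by
            simp [aStep, if_neg h1, if_neg h2]
          have hB : bStep bag stop negs (bOf stop d aux neg) "" = bOf stop d aux neg := by
            simp [bStep, bOf, if_neg h1, if_neg h2']
          rw [hA, hB, ih]

-- ===== VERDICT (by name: the statement is the Claim_ definition above) =====
theorem identify_negations_on_unigrams_spec : Claim_equal_identify_negations_on_unigrams := by
  intro tokens bag stop negs _
  unfold Spec_identify_negations_on_unigrams identify_negations_on_unigrams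
    identify_negations_on_unigrams_alt
  have h := main_loop bag stop negs tokens PySem.Dict.empty [] false
  simp only [bOf, uniF, biF, triF, List.dropLast_nil, List.getLast?_nil, List.filter_nil,
    List.drop_nil, List.zip_nil_left, List.map_nil] at h
  exact congrArg PySem.Dict.items h
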